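-- pv_equiv track=rewrite | github.com/FranzValerio/GDMTH-Project | scripts/get_unique_divisiones_gdmth.py | remove_redundant_divisions
-- ===== SOURCE A (Python) =====
-- from collections import defaultdict
--
-- def remove_redundant_divisions(unique_divisions):
--     # Dictionary to store the cleaned data
--     cleaned_dict = {}
--
--     for estado, municipios in unique_divisions.items():
--         # Use a dictionary to track unique divisions in this state
--         division_map = defaultdict(list)
--
--         for municipio, divisiones in municipios.items():
--             for division in divisiones:
--                 # Store municipio under its division in division_map
--                 division_map[division].append(municipio)
--
--         # Rebuild the cleaned data structure for this state
--         cleaned_dict[estado] = {}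
--         for division, municipios_list in division_map.items():
--             # Use the first municipio associated with each division as representative
--             cleaned_dict[estado][municipios_list[0]] = [division]
--
--     return cleaned_dict
-- ===== SOURCE B (Python) =====
-- def _first_encounters(encounters):
--     # keep only each division's first (municipio, division) encounter
--     seen = set()
--     out = []
--     for m, d in encounters:
--         if d not in seen:
--             seen.add(d)
--             out.append((m, d))
--     return out
--
--
-- def remove_redundant_divisions(unique_divisions):
--     # Per state: flatten to an encounter stream, filter it to first
--     # encounters, then build the dict in one comprehension-free pass.
--     cleaned_dict = {}
--     for estado, municipios in unique_divisions.items():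
--         encounters = [(m, d) for m, ds in municipios.items() for d in ds]
--         state = {}
--         for m, d in _first_encounters(encounters):
--             state[m] = [d]
--         cleaned_dict[estado] = state
--     return cleaned_dict
-- ===== Notes on version B (the rewrite author's own statement) =====
-- stated objective: simpler
-- what changed: per state, B flattens the municipio/division pairs into one encounter stream, filters it to each division's first encounter with a seen-set helper, and builds the dict from that list, replacing A's division->municipios grouping map and its rebuild loop that reads municipios_list[0]
import Mathlib
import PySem

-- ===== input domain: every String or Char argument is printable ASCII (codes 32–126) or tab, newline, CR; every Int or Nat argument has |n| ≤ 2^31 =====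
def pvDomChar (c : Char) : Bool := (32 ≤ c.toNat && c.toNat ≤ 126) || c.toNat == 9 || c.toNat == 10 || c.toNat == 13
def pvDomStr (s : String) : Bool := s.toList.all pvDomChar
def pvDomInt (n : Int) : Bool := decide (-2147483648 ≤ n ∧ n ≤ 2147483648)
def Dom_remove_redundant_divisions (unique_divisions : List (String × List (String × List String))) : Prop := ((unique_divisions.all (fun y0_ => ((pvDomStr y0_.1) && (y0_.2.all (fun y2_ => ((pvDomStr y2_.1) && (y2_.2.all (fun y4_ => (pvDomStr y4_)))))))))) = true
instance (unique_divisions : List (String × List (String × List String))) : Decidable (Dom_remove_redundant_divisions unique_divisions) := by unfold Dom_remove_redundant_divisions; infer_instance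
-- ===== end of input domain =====

-- B replaces A's per-state division→municipios grouping map plus rebuild loop by a staged
-- pipeline: flatten to an encounter stream, filter to first encounters, build the dict
-- (objective: simpler).

-- ===== PORT A =====
-- municipios_list[0] is ported as pyGetD … 0 "": every division_map value is built by
-- appending at least once, so the list is nonempty and Python's [0] never raises.
def remove_redundant_divisions (unique_divisions : List (String × List (String × List String))) : List (String × List (String × List String)) :=
  (unique_divisions.foldl
    (fun (cleaned : PySem.Dict String (List (String × List String))) es =>
      let division_map : PySem.Dict String (List String) :=
        es.2.foldl
          (fun dm md =>
            md.2.foldl (fun dm division => dm.modify division [] (fun l => l ++ [md.1])) dm)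
          PySem.Dict.empty
      let inner : PySem.Dict String (List String) :=
        division_map.items.foldl
          (fun inner dv => inner.insert (PySem.List.pyGetD dv.2 0 "") [dv.1])
          PySem.Dict.empty
      cleaned.insert es.1 inner.items)
    PySem.Dict.empty).items

-- ===== PORT B =====
-- helper _first_encounters of Source B: a seen-set filter over the encounter stream
def firstEncounters (encounters : List (String × String)) : List (String × String) :=
  (encounters.foldl
    (fun (so : PySem.Set String × List (String × String)) p =>
      if !(PySem.Set.contains so.1 p.2) then (PySem.Set.add so.1 p.2, so.2 ++ [p]) else so)
    (PySem.Set.empty, [])).2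

def remove_redundant_divisions_alt (unique_divisions : List (String × List (String × List String))) : List (String × List (String × List String)) :=
  (unique_divisions.foldl
    (fun (cleaned : PySem.Dict String (List (String × List String))) es =>
      let encounters : List (String × String) :=
        es.2.flatMap (fun md => md.2.map (fun d => (md.1, d)))
      let state : PySem.Dict String (List String) :=
        (firstEncounters encounters).foldl
          (fun (st : PySem.Dict String (List String)) p => st.insert p.1 [p.2])
          PySem.Dict.empty
      cleaned.insert es.1 state.items)
    PySem.Dict.empty).items

-- ===== PRECONDITION & SPEC =====
def Spec_remove_redundant_divisions (unique_divisions : List (String × List (String × List String))) (out : List (String × List (String × List String))) : Prop := out = remove_redundant_divisions_alt unique_divisions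
instance (unique_divisions : List (String × List (String × List String))) (out : List (String × List (String × List String))) : Decidable (Spec_remove_redundant_divisions unique_divisions out) := by unfold Spec_remove_redundant_divisions; infer_instance

-- ===== CLAIM (what is proved, stated in full; the proofs are below) =====
def Claim_equal_remove_redundant_divisions : Prop := ∀ (unique_divisions : List (String × List (String × List String))), Dom_remove_redundant_divisions unique_divisions → Spec_remove_redundant_divisions unique_divisions (remove_redundant_divisions unique_divisions)

-- ===== LEMMAS AND PROOFS =====

-- the per-state stream of (municipio, division) encounters, in iteration order
def pvEncs (ms : List (String × List String)) : List (String × String) :=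
  ms.flatMap (fun md => md.2.map (fun d => (md.1, d)))

-- one encounter step of A's grouping loop
def pvStepA (dm : PySem.Dict String (List String)) (p : String × String) : PySem.Dict String (List String) :=
  dm.modify p.2 [] (fun l => l ++ [p.1])

-- A's rebuild loop reads exactly (first municipio, division) off division_map's items
def pvG (dm : PySem.Dict String (List String)) : List (String × String) :=
  dm.items.map (fun dv => (PySem.List.pyGetD dv.2 0 "", dv.1))

-- the (municipio, division) pairs at which a division is seen for the first time
def pvFirsts : List String → List (String × String) → List (String × String)
  | _, [] => []
  | seen, p :: t =>
    if p.2 ∈ seen then pvFirsts seen t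
    else p :: pvFirsts (PySem.Set.add seen p.2) t

theorem pv_flattenA (ms : List (String × List String)) (dm : PySem.Dict String (List String)) :
    ms.foldl (fun dm md => md.2.foldl (fun dm division => dm.modify division [] (fun l => l ++ [md.1])) dm) dm
      = (pvEncs ms).foldl pvStepA dm := by
  simp [pvEncs, List.foldl_flatMap, List.foldl_map, pvStepA]

-- B's seen-set filter computes pvFirsts
theorem pv_foldFE (l : List (String × String)) (seen : PySem.Set String)
    (acc : List (String × String)) :
    (l.foldl
      (fun (so : PySem.Set String × List (String × String)) p =>
        if !(PySem.Set.contains so.1 p.2) then (PySem.Set.add so.1 p.2, so.2 ++ [p]) else so)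
      (seen, acc)).2 = acc ++ pvFirsts seen l := by
  induction l generalizing seen acc with
  | nil => simp [pvFirsts]
  | cons p t ih =>
    rw [List.foldl_cons]
    by_cases h : p.2 ∈ seen
    · rw [if_neg (by simp [h]), ih, pvFirsts, if_pos h]
    · rw [if_pos (by simp [h]), ih, pvFirsts, if_neg h]
      simp

theorem pv_firstEncounters (l : List (String × String)) :
    firstEncounters l = pvFirsts PySem.Set.empty l := by
  unfold firstEncounters
  rw [pv_foldFE l PySem.Set.empty []]
  rfl

theorem pv_main (l : List (String × String)) (dm : PySem.Dict String (List String))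
    (seen : PySem.Set String)
    (hnd : dm.keys.Nodup) (hne : ∀ p ∈ dm.items, p.2 ≠ [])
    (hseen : ∀ d, d ∈ seen ↔ dm.contains d = true) :
    pvG (l.foldl pvStepA dm) = pvG dm ++ pvFirsts seen l := by
  induction l generalizing dm seen with
  | nil => simp [pvFirsts]
  | cons p t ih =>
    by_cases hc : dm.contains p.2 = true
    · -- division already grouped: the map entry grows at the tail, its head is unchanged
      have hstep : pvStepA dm p = dm.insert p.2 (dm.getD p.2 [] ++ [p.1]) := rfl
      have hG : pvG (dm.insert p.2 (dm.getD p.2 [] ++ [p.1])) = pvG dm := by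
        simp only [pvG, PySem.Dict.items_insert_of_contains dm _ hc, List.map_map]
        apply List.map_congr_left
        intro q hq
        by_cases hk : q.1 = p.2
        · have hv : dm.getD p.2 [] = q.2 := by
            have : (p.2, q.2) ∈ dm.items := by
              have := hq; rw [← hk]; simpa using this
            exact PySem.Dict.getD_of_mem_items dm this hnd []
          have hqne : q.2 ≠ [] := hne q hq
          cases hq2 : q.2 with
          | nil => exact absurd hq2 hqne
          | cons a as =>
            simp [Function.comp, hk, hv, hq2, PySem.List.pyGetD_zero]
        · simp [Function.comp, hk]
      rw [List.foldl_cons, hstep,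
          ih (dm.insert p.2 (dm.getD p.2 [] ++ [p.1])) seen
            (PySem.Dict.nodup_keys_insert dm _ _ hnd)
            (by
              intro q hq
              rcases (PySem.Dict.mem_items_insert _ _ _ q).1 hq with hq1 | hq2
              · rw [hq1]; simp
              · exact hne q hq2.1)
            (by
              intro d
              rw [PySem.Dict.contains_insert]
              by_cases hd : d = p.2
              · subst hd; simp [hc, hseen]
              · simp [hd, hseen d]),
          hG, pvFirsts]
      have hmem : p.2 ∈ seen := (hseen p.2).2 hc
      simp [hmem]
    · -- first encounter of this division: a fresh entry (division, [municipio]) appends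
      simp at hc
      have hgd : dm.getD p.2 [] = [] := PySem.Dict.getD_of_not_contains dm [] hc
      have hstep : pvStepA dm p = dm.insert p.2 [p.1] := by
        simp [pvStepA, PySem.Dict.modify, hgd]
      have hG : pvG (dm.insert p.2 [p.1]) = pvG dm ++ [p] := by
        simp [pvG, PySem.Dict.items_insert_of_not_contains dm _ hc, PySem.List.pyGetD_zero]
      have hsn : p.2 ∉ seen := fun hm => by simp [(hseen p.2).1 hm] at hc
      have hadd : PySem.Set.add seen p.2 = seen ++ [p.2] :=
        PySem.Set.add_of_not_mem hsn
      rw [List.foldl_cons, hstep,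
          ih (dm.insert p.2 [p.1]) (PySem.Set.add seen p.2)
            (PySem.Dict.nodup_keys_insert dm _ _ hnd)
            (by
              intro q hq
              rcases (PySem.Dict.mem_items_insert _ _ _ q).1 hq with hq1 | hq2
              · rw [hq1]; simp
              · exact hne q hq2.1)
            (by
              intro d
              rw [PySem.Dict.contains_insert, hadd]
              by_cases hd : d = p.2
              · subst hd; simp
              · simp [hd, hseen]),
          hG, pvFirsts]
      simp [hsn]

-- the two per-state computations produce the same inner dict
theorem pv_inner_eq (ms : List (String × List String)) :
    ((ms.foldl (fun dm md => md.2.foldl (fun dm division => dm.modify division [] (fun l => l ++ [md.1])) dm)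
        (PySem.Dict.empty : PySem.Dict String (List String))).items.foldl
      (fun inner dv => inner.insert (PySem.List.pyGetD dv.2 0 "") [dv.1])
      (PySem.Dict.empty : PySem.Dict String (List String)))
    = (firstEncounters (ms.flatMap (fun md => md.2.map (fun d => (md.1, d))))).foldl
        (fun (st : PySem.Dict String (List String)) p => st.insert p.1 [p.2])
        PySem.Dict.empty := by
  rw [pv_flattenA]
  have hmain := pv_main (pvEncs ms) PySem.Dict.empty PySem.Set.empty
    (by simp [PySem.Dict.keys_empty]) (by simp [PySem.Dict.empty])
    (by intro d; simp [PySem.Set.empty, PySem.Dict.contains_empty])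
  have hG : pvG ((pvEncs ms).foldl pvStepA PySem.Dict.empty)
      = pvFirsts PySem.Set.empty (pvEncs ms) := by
    rw [hmain]; simp [pvG, PySem.Dict.empty, PySem.Set.empty]
  calc ((pvEncs ms).foldl pvStepA PySem.Dict.empty).items.foldl
        (fun inner dv => inner.insert (PySem.List.pyGetD dv.2 0 "") [dv.1]) PySem.Dict.empty
      = (pvG ((pvEncs ms).foldl pvStepA PySem.Dict.empty)).foldl
        (fun st p => st.insert p.1 [p.2]) PySem.Dict.empty := by
        simp [pvG, List.foldl_map]
    _ = _ := by rw [hG, pv_firstEncounters, pvEncs]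

-- ===== VERDICT (by name: the statement is the Claim_ definition above) =====
theorem remove_redundant_divisions_spec : Claim_equal_remove_redundant_divisions := by
  intro us _
  unfold Spec_remove_redundant_divisions
  simp only [remove_redundant_divisions, remove_redundant_divisions_alt]
  congr 1
  congr 1
  funext cleaned es
  rw [pv_inner_eq es.2]
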